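-- pv_equiv track=rewrite | github.com/BraCR10/TEC_Assigments-Intro-Taller-SI | Ejercicios Listas/01-EjerciciosListas.py | largoLista
-- ===== SOURCE A (Python) =====
-- def largoLista(lista):
--     if type(lista)!=list:#Validacion
--         return "Debe ser una lista"
--     else:
--         cont=0
--         for i in range(len(lista)):#De 0 a n
--             cont+=1
--         return cont
-- ===== SOURCE B (Python) =====
-- def largoLista(lista):
--     if type(lista) != list:  # Validacion
--         return "Debe ser una lista"
--     return len(lista)
-- ===== Notes on version B (the rewrite author's own statement) =====
-- stated objective: simpler
-- what changed: Replaces the counter-incrementing loop over range(len(lista)) with a direct len(lista) call (closed form instead of iteration), keeping the type guard.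
import Mathlib
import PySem

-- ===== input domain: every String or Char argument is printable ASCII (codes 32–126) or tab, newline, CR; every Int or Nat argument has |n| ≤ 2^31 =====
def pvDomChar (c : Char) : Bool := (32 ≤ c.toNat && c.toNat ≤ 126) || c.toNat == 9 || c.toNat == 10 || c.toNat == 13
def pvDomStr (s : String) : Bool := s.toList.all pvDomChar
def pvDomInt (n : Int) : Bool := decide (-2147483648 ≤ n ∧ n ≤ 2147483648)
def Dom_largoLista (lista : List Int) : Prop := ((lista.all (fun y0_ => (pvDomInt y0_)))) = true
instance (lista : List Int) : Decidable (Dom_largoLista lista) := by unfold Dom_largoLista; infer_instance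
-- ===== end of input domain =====

-- ===== PORT A =====
-- loop: for i in range(len(lista)): cont += 1
def largoLista (lista : List Int) : Int :=
  (PySem.List.pyRange 0 (lista.length : Int) 1).foldl (fun cont _ => cont + 1) 0

-- ===== PORT B =====
def largoLista_alt (lista : List Int) : Int := (lista.length : Int)

-- ===== PRECONDITION & SPEC =====
def Spec_largoLista (lista : List Int) (out : Int) : Prop := out = largoLista_alt lista
instance (lista : List Int) (out : Int) : Decidable (Spec_largoLista lista out) := by unfold Spec_largoLista; infer_instance

-- ===== CLAIM (what is proved, stated in full; the proofs are below) =====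
def Claim_equal_largoLista : Prop := ∀ (lista : List Int), Dom_largoLista lista → Spec_largoLista lista (largoLista lista)

-- ===== LEMMAS AND PROOFS =====

-- ===== VERDICT (by name: the statement is the Claim_ definition above) =====
theorem foldl_inc (l : List Int) (c : Int) :
    l.foldl (fun cont _ => cont + 1) c = c + l.length := by
  induction l generalizing c with
  | nil => simp
  | cons x xs ih => simp [List.foldl, ih]; omega

theorem largoLista_spec : Claim_equal_largoLista := by
  intro lista _
  unfold Spec_largoLista largoLista largoLista_alt
  rw [foldl_inc]
  simp [PySem.List.length_pyRange_one]
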